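-- pv_equiv track=rewrite | github.com/sniderg/connect4_q | othello_man.py | list_moves
-- ===== SOURCE A (Python) =====
-- from typing import Optional, Tuple, List
--
-- def list_moves(mask:int)->List[str]:
--     out=[]
--     while mask:
--         lsb = mask & -mask
--         idx = (lsb.bit_length()-1)
--         r,c = divmod(idx,8)
--         out.append(f"{chr(c+97)}{r+1}")
--         mask ^= lsb
--     return out
-- ===== SOURCE B (Python) =====
-- from typing import List
--
-- def list_moves(mask: int) -> List[str]:
--     out = []
--     for i in range(mask.bit_length()):
--         if (mask >> i) & 1:
--             r, c = divmod(i, 8)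
--             out.append(f"{chr(c+97)}{r+1}")
--     return out
-- ===== Notes on version B (the rewrite author's own statement) =====
-- stated objective: idiomatic
-- what changed: B scans every bit index 0..bit_length-1 with a shift-and-test instead of A's repeated lowest-set-bit extraction (mask & -mask) and in-place clearing; Pre_ excludes negative masks, on which A's while loop never terminates.
import Mathlib
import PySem

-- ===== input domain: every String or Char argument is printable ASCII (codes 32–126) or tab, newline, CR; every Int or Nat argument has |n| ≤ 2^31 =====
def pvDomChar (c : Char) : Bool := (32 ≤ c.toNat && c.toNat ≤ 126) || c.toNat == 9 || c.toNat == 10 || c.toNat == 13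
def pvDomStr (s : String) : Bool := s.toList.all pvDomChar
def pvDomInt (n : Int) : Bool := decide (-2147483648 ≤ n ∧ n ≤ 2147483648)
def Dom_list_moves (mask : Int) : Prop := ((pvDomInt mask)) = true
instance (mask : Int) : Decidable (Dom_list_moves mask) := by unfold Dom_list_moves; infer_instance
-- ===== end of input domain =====

-- B lists the set bits of `mask` by scanning every bit index low-to-high (shift-and-test)
-- instead of A's repeated lowest-set-bit extraction (mask & -mask) with in-place clearing.

-- ===== PORT A =====
-- A's `while mask:` loop; the fuel argument only makes the recursion structural
-- (each iteration strictly decreases a nonnegative mask, so `mask.toNat + 1` steps suffice).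
def listMovesLoop : Nat → Int → List String → List String
  | 0, _, out => out
  | fuel + 1, mask, out =>
    if mask = 0 then out
    else
      let lsb := PySem.Int.band mask (-mask)
      let idx : Int := (PySem.Int.bitLength lsb : Int) - 1
      let r := PySem.Int.floordiv idx 8
      let c := PySem.Int.mod idx 8
      listMovesLoop fuel (PySem.Int.bxor mask lsb)
        (out ++ [String.mk [Char.ofNat (c + 97).toNat] ++ PySem.Int.toStr (r + 1)])

def list_moves (mask : Int) : List String := listMovesLoop (mask.toNat + 1) mask []

-- ===== PORT B =====
def list_moves_alt (mask : Int) : List String :=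
  (List.range (PySem.Int.bitLength mask)).foldl
    (fun (out : List String) (i : Nat) =>
      if PySem.Int.band (mask >>> i) 1 ≠ 0 then
        out ++ [String.mk [Char.ofNat (i % 8 + 97)] ++ PySem.Int.toStr (((i / 8 : Nat) : Int) + 1)]
      else out) []

-- ===== PRECONDITION & SPEC =====
-- Pre_ excludes negative masks, on which A's `while mask:` loop never terminates (Python diverges).
def Pre_list_moves (mask : Int) : Prop := 0 ≤ mask
instance (mask : Int) : Decidable (Pre_list_moves mask) := by unfold Pre_list_moves; infer_instance
def pvWitness_list_moves : Int := (5)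

def Spec_list_moves (mask : Int) (out : List String) : Prop := out = list_moves_alt mask
instance (mask : Int) (out : List String) : Decidable (Spec_list_moves mask out) := by unfold Spec_list_moves; infer_instance

-- ===== CLAIM (what is proved, stated in full; the proofs are below) =====
def Claim_equal_list_moves : Prop := ∀ (mask : Int), Dom_list_moves mask → Pre_list_moves mask → Spec_list_moves mask (list_moves mask)

-- ===== LEMMAS AND PROOFS =====

-- the board coordinate of bit index k (exactly B's formatting expression)
def pvCoord (k : Nat) : String :=
  String.mk [Char.ofNat (k % 8 + 97)] ++ PySem.Int.toStr (((k / 8 : Nat) : Int) + 1)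

-- indices of the set bits of m, in increasing order, offset by `off`
def pvBits (m off : Nat) : List Nat :=
  if _h : m = 0 then []
  else (if m % 2 = 1 then [off] else []) ++ pvBits (m / 2) (off + 1)
termination_by m
decreasing_by omega

theorem pvBits_zero (off : Nat) : pvBits 0 off = [] := by
  rw [pvBits]; simp

theorem pvBits_unfold (m off : Nat) (h : m ≠ 0) :
    pvBits m off = (if m % 2 = 1 then [off] else []) ++ pvBits (m / 2) (off + 1) := by
  rw [pvBits]; simp [h]

theorem pvBits_double (a off : Nat) : pvBits (2 * a) off = pvBits a (off + 1) := by
  by_cases ha : a = 0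
  · simp [ha, pvBits_zero]
  · rw [pvBits_unfold (2 * a) off (by omega)]
    have h1 : (2 * a) % 2 = 0 := by omega
    have h2 : (2 * a) / 2 = a := by omega
    simp [h1, h2]

theorem pvBits_shift (j o e : Nat) : pvBits (2 ^ j * o) e = pvBits o (e + j) := by
  induction j generalizing e with
  | zero => simp
  | succ j ih =>
    have : 2 ^ (j + 1) * o = 2 * (2 ^ j * o) := by ring
    rw [this, pvBits_double, ih]
    ring_nf

-- bit of the predecessor of an odd number
theorem testBit_pred_odd (o t : Nat) (ho : o % 2 = 1) :
    (o - 1).testBit t = if t = 0 then false else o.testBit t := by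
  cases t with
  | zero => simp [Nat.testBit_zero]; omega
  | succ t =>
    have : (o - 1) / 2 = o / 2 := by omega
    simp [Nat.testBit_add_one, this]

theorem nat_and_pred (j o : Nat) (ho : o % 2 = 1) :
    (2 ^ j * o) &&& (2 ^ j * o - 1) = 2 ^ j * (o - 1) := by
  apply Nat.eq_of_testBit_eq
  intro i
  have hp : 1 ≤ 2 ^ j := Nat.one_le_two_pow
  have hsplit : 2 ^ j * o = 2 ^ j * (o - 1) + 2 ^ j := by
    have h : o = (o - 1) + 1 := by omega
    calc 2 ^ j * o = 2 ^ j * ((o - 1) + 1) := by rw [← h]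
    _ = 2 ^ j * (o - 1) + 2 ^ j := by ring
  have e1 : 2 ^ j * o = 2 ^ j * o + 0 := by omega
  have e2 : 2 ^ j * o - 1 = 2 ^ j * (o - 1) + (2 ^ j - 1) := by omega
  have e3 : 2 ^ j * (o - 1) = 2 ^ j * (o - 1) + 0 := by omega
  have t1 : (2 ^ j * o).testBit i = if i < j then Nat.testBit 0 i else o.testBit (i - j) := by
    conv_lhs => rw [e1]
    exact Nat.testBit_two_pow_mul_add o (by positivity) i
  have t2 : (2 ^ j * o - 1).testBit i
      = if i < j then (2 ^ j - 1).testBit i else (o - 1).testBit (i - j) := by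
    conv_lhs => rw [e2]
    exact Nat.testBit_two_pow_mul_add (o - 1) (by omega) i
  have t3 : (2 ^ j * (o - 1)).testBit i
      = if i < j then Nat.testBit 0 i else (o - 1).testBit (i - j) := by
    conv_lhs => rw [e3]
    exact Nat.testBit_two_pow_mul_add (o - 1) (by positivity) i
  rw [Nat.testBit_and, t1, t2, t3]
  by_cases hij : i < j
  · simp [hij]
  · simp only [if_neg hij]
    rw [testBit_pred_odd o (i - j) ho]
    by_cases h0 : i - j = 0
    · simp [h0, Nat.testBit_zero, ho]
    · simp [h0, Bool.and_self]

theorem nat_xor_lsb (j o : Nat) (ho : o % 2 = 1) :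
    (2 ^ j * o) ^^^ 2 ^ j = 2 ^ j * (o - 1) := by
  apply Nat.eq_of_testBit_eq
  intro i
  have e1 : 2 ^ j * o = 2 ^ j * o + 0 := by omega
  have e3 : 2 ^ j * (o - 1) = 2 ^ j * (o - 1) + 0 := by omega
  have t1 : (2 ^ j * o).testBit i = if i < j then Nat.testBit 0 i else o.testBit (i - j) := by
    conv_lhs => rw [e1]
    exact Nat.testBit_two_pow_mul_add o (by positivity) i
  have t3 : (2 ^ j * (o - 1)).testBit i
      = if i < j then Nat.testBit 0 i else (o - 1).testBit (i - j) := by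
    conv_lhs => rw [e3]
    exact Nat.testBit_two_pow_mul_add (o - 1) (by positivity) i
  rw [Nat.testBit_xor, t1, t3, Nat.testBit_two_pow]
  by_cases hij : i < j
  · have hji : decide (j = i) = false := by simp; omega
    simp [hij, hji]
  · simp only [if_neg hij]
    rw [testBit_pred_odd o (i - j) ho]
    by_cases h0 : i - j = 0
    · have hji : j = i := by omega
      simp [hji, Nat.testBit_zero, ho]
    · have hji : decide (j = i) = false := by simp; omega
      simp [h0, hji]

-- A's `mask & -mask` extracts the lowest set bit
theorem band_neg_self (j o : Nat) (ho : o % 2 = 1) :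
    PySem.Int.band ((2 ^ j * o : Nat) : Int) (-((2 ^ j * o : Nat) : Int)) = ((2 ^ j : Nat) : Int) := by
  have hM : 1 ≤ 2 ^ j * o := Nat.mul_pos (by positivity) (by omega)
  have h1 : (0 : Int) ≤ ((2 ^ j * o : Nat) : Int) := by positivity
  have h2 : ¬ (0 : Int) ≤ -((2 ^ j * o : Nat) : Int) := by
    simp only [not_le]
    omega
  simp only [PySem.Int.band, if_pos h1, if_neg h2, neg_neg]
  have ht : (((2 ^ j * o : Nat) : Int) - 1).toNat = 2 ^ j * o - 1 := by omega
  have ht2 : (((2 ^ j * o : Nat) : Int)).toNat = 2 ^ j * o := by omega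
  rw [ht, ht2, nat_and_pred j o ho]
  have hle : 2 ^ j * (o - 1) ≤ 2 ^ j * o := Nat.mul_le_mul_left _ (by omega)
  have : 2 ^ j * o - 2 ^ j * (o - 1) = 2 ^ j := by
    have : 2 ^ j * o = 2 ^ j * (o - 1) + 2 ^ j := by
      have : o = (o - 1) + 1 := by omega
      nlinarith [this]
    omega
  rw [this]

theorem bitLength_two_pow (j : Nat) : PySem.Int.bitLength ((2 ^ j : Nat) : Int) = j + 1 := by
  induction j with
  | zero => decide
  | succ j ih =>
    rw [PySem.Int.bitLength_natCast (by positivity)]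
    have : 2 ^ (j + 1) / 2 = 2 ^ j := by omega
    rw [this, ih]

-- A's formatting of bit index k equals pvCoord k
theorem coordA (k : Nat) :
    String.mk [Char.ofNat ((PySem.Int.mod (k : Int) 8 + 97)).toNat] ++
      PySem.Int.toStr (PySem.Int.floordiv (k : Int) 8 + 1) = pvCoord k := by
  have h8 : ((8 : Nat) : Int) = (8 : Int) := by norm_num
  have hm : PySem.Int.mod (k : Int) 8 = ((k % 8 : Nat) : Int) := by
    rw [← h8, PySem.Int.mod_natCast]
  have hd : PySem.Int.floordiv (k : Int) 8 = ((k / 8 : Nat) : Int) := by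
    rw [← h8, PySem.Int.floordiv_natCast]
  rw [hm, hd]
  have : (((k % 8 : Nat) : Int) + 97).toNat = k % 8 + 97 := by omega
  rw [this]
  rfl

-- main loop invariant for A
theorem loopA (fuel : Nat) : ∀ (m e : Nat) (out : List String), 2 ^ e * m < fuel →
    listMovesLoop fuel ((2 ^ e * m : Nat) : Int) out = out ++ (pvBits m e).map pvCoord := by
  induction fuel with
  | zero => intro m e out h; omega
  | succ fuel ih =>
    intro m e out h
    by_cases hm : m = 0
    · subst hm; simp [listMovesLoop, pvBits_zero]
    · obtain ⟨j, o, hodd, rfl⟩ := Nat.exists_eq_two_pow_mul_odd hm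
      have ho : o % 2 = 1 := Nat.odd_iff.mp hodd
      have hM : 1 ≤ 2 ^ (e + j) * o := Nat.mul_pos (by positivity) (by omega)
      have hmask : 2 ^ e * (2 ^ j * o) = 2 ^ (e + j) * o := by ring
      rw [hmask]
      have hne : ¬ (((2 ^ (e + j) * o : Nat) : Int) = 0) := by
        simp only [Int.natCast_eq_zero]; omega
      simp only [listMovesLoop, if_neg hne]
      rw [band_neg_self (e + j) o ho, bitLength_two_pow (e + j)]
      have hidx : ((e + j + 1 : Nat) : Int) - 1 = ((e + j : Nat) : Int) := by push_cast; ring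
      rw [hidx, coordA (e + j)]
      have hx : PySem.Int.bxor ((2 ^ (e + j) * o : Nat) : Int) ((2 ^ (e + j) : Nat) : Int)
          = ((2 ^ (e + j + 1) * (o / 2) : Nat) : Int) := by
        rw [PySem.Int.bxor_natCast, nat_xor_lsb (e + j) o ho]
        congr 1
        have : o - 1 = 2 * (o / 2) := by omega
        rw [this]; ring
      rw [hx]
      have hlt : 2 ^ (e + j + 1) * (o / 2) < fuel := by
        have h1 : 2 ^ (e + j + 1) * (o / 2) = 2 ^ (e + j) * (o - 1) := by
          have : o - 1 = 2 * (o / 2) := by omega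
          rw [this]; ring
        have h2 : 2 ^ (e + j) * (o - 1) < 2 ^ (e + j) * o := by
          have hp : 0 < 2 ^ (e + j) := by positivity
          exact (Nat.mul_lt_mul_left hp).mpr (by omega)
        omega
      rw [ih (o / 2) (e + j + 1) _ hlt]
      rw [pvBits_shift j o e, pvBits_unfold o (e + j) (by omega), if_pos ho]
      simp

-- foldl with conditional append is filter-then-map
theorem foldl_append_ite {p : Nat → Prop} [DecidablePred p] (f : Nat → String) :
    ∀ (xs : List Nat) (out : List String),
    xs.foldl (fun out i => if p i then out ++ [f i] else out) out
      = out ++ ((xs.filter (fun i => decide (p i))).map f) := by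
  intro xs
  induction xs with
  | nil => simp
  | cons x xs ih =>
    intro out
    by_cases hx : p x <;> simp [List.foldl_cons, hx, ih]

-- the filtered range of bit indices is pvBits
theorem range_filter_testBit : ∀ (n m e : Nat), m < 2 ^ n →
    ((List.range n).filter (fun i => m.testBit i)).map (· + e) = pvBits m e := by
  intro n
  induction n with
  | zero =>
    intro m e h
    have : m = 0 := by omega
    simp [this, pvBits_zero]
  | succ n ih =>
    intro m e h
    by_cases hm : m = 0
    · simp [hm, pvBits_zero]
    · rw [List.range_succ_eq_map]
      rw [pvBits_unfold m e hm]
      simp only [List.filter_cons, List.filter_map]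
      have hb0 : m.testBit 0 = decide (m % 2 = 1) := Nat.testBit_zero m
      have hcomp : (fun i => m.testBit i) ∘ Nat.succ = fun i => (m / 2).testBit i := by
        funext i; simp [Nat.testBit_add_one]
      rw [hcomp]
      have hmap : ((· + e) ∘ Nat.succ : Nat → Nat) = (· + (e + 1)) := by
        funext i; simp; omega
      have hdiv : m / 2 < 2 ^ n := by
        have : 2 ^ (n + 1) = 2 * 2 ^ n := by ring
        omega
      by_cases hpar : m % 2 = 1
      · have ht : m.testBit 0 = true := by rw [hb0]; simp [hpar]
        simp only [ht, if_true, hpar, List.map_cons, List.map_map, hmap,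
          ih (m / 2) (e + 1) hdiv]
        simp
      · have ht : m.testBit 0 = false := by rw [hb0]; simp [hpar]
        simp only [ht, Bool.false_eq_true, if_false, hpar, List.map_map, hmap,
          ih (m / 2) (e + 1) hdiv]
        simp

-- B's bit test is Nat.testBit
theorem alt_test (m i : Nat) :
    (PySem.Int.band ((m : Int) >>> i) 1 ≠ 0) ↔ m.testBit i = true := by
  rw [← Int.natCast_shiftRight]
  have h1 : (1 : Int) = ((1 : Nat) : Int) := by norm_num
  rw [h1, PySem.Int.band_natCast]
  rw [Nat.and_one_is_mod, Nat.shiftRight_eq_div_pow]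
  have hb : m.testBit i = ((m / 2 ^ i).testBit 0) := by
    rw [Nat.testBit_div_two_pow]; simp
  rw [hb, Nat.testBit_zero]
  rcases Nat.mod_two_eq_zero_or_one (m / 2 ^ i) with h | h <;> simp [h]

theorem alt_eq (m : Nat) : list_moves_alt (m : Int) = (pvBits m 0).map pvCoord := by
  unfold list_moves_alt
  have hfun : (fun (out : List String) (i : Nat) =>
      if PySem.Int.band ((m : Int) >>> i) 1 ≠ 0 then
        out ++ [String.mk [Char.ofNat (i % 8 + 97)] ++ PySem.Int.toStr (((i / 8 : Nat) : Int) + 1)]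
      else out)
      = (fun (out : List String) (i : Nat) => if PySem.Int.band ((m : Int) >>> i) 1 ≠ 0 then out ++ [pvCoord i] else out) := by
    funext out i; rfl
  rw [hfun, foldl_append_ite pvCoord]
  have hfilter : (fun (i : Nat) => decide (PySem.Int.band ((m : Int) >>> i) 1 ≠ 0))
      = (fun (i : Nat) => m.testBit i) := by
    funext i
    by_cases hb : m.testBit i = true
    · simp [hb, (alt_test m i).mpr hb]
    · have : ¬ (PySem.Int.band ((m : Int) >>> i) 1 ≠ 0) := fun h => hb ((alt_test m i).mp h)
      simp only [hb, decide_eq_false this]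
  rw [hfilter]
  have hlt : m < 2 ^ PySem.Int.bitLength (m : Int) := by
    have := PySem.Int.lt_two_pow_bitLength (m : Int)
    simpa using this
  have hfin := range_filter_testBit (PySem.Int.bitLength (m : Int)) m 0 hlt
  simp only [Nat.add_zero, List.map_id'] at hfin
  rw [hfin]
  simp

-- ===== VERDICT (by name: the statement is the Claim_ definition above) =====
theorem list_moves_spec : Claim_equal_list_moves := by
  intro mask _hdom hpre
  unfold Spec_list_moves
  unfold Pre_list_moves at hpre
  obtain ⟨m, rfl⟩ : ∃ m : Nat, mask = (m : Int) := ⟨mask.toNat, by omega⟩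
  unfold list_moves
  have h1 : ((m : Int)).toNat = m := by omega
  have h2 : ((2 ^ 0 * m : Nat) : Int) = (m : Int) := by norm_num
  rw [h1]
  have hA := loopA (m + 1) m 0 [] (by omega)
  rw [h2] at hA
  rw [hA, alt_eq m]
  simp
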